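-- pv_equiv track=rewrite | github.com/OlehPalka/puzzle.py | skyscrapers.py | check_uniqueness_in_rows
-- ===== SOURCE A (Python) =====
-- def check_uniqueness_in_rows(board: list):
--     """
--     Check buildings of unique height in each row.
--
--     Return True if buildings in a row have unique length, False otherwise.
--
--     >>> check_uniqueness_in_rows(['***21**', '412453*', '423145*', '*543215',\
--  '*35214*', '*41532*', '*2*1***'])
--     True
--     >>> check_uniqueness_in_rows(['***21**', '452453*', '423145*', '*543215',\
--  '*35214*', '*41532*', '*2*1***'])
--     False
--     >>> check_uniqueness_in_rows(['***21**', '412453*', '423145*', '*553215',\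
--  '*35214*', '*41532*', '*2*1***'])
--     False
--     """
--     del board[0]
--     del board[-1]
--     for element in board:
--         element = element[1:-1]
--         for symbol in element:
--             if element.count(symbol) != 1 and symbol not in " *":
--                 return False
--     return True
-- ===== SOURCE B (Python) =====
-- def check_uniqueness_in_rows(board: list):
--     del board[0]
--     del board[-1]
--     for row in board:
--         heights = sorted(c for c in row[1:-1] if c not in " *")
--         for i in range(1, len(heights)):
--             if heights[i - 1] == heights[i]:
--                 return False
--     return True
-- ===== Notes on version B (the rewrite author's own statement) =====
-- stated objective: alternative
-- what changed: Replaces the per-symbol count() rescans (quadratic in row width) by filtering out ' ' and '*', sorting the remaining heights and doing one adjacent-equality scan per row; the two in-place deletions are kept identical.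
import Mathlib
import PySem

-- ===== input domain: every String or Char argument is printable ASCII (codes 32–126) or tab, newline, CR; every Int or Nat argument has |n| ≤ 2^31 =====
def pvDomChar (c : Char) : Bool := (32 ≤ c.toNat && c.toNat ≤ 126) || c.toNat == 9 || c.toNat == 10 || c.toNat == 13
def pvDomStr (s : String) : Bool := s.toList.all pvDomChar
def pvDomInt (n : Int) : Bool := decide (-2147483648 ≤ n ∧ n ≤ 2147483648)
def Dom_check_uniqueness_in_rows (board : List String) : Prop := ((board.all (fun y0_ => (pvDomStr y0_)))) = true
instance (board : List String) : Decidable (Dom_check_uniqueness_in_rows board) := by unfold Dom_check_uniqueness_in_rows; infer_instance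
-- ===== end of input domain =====

-- B replaces the per-symbol count() rescans by filter + sort + one adjacent scan per row
-- (alternative algorithm); the two in-place deletions of A are kept identical in B, so the
-- caller-visible mutation is the same; the theorems below are about the return value.

-- ===== PORT A =====
-- inner loop: 'for symbol in rem: if element.count(symbol) != 1 and symbol not in " *": return False'
def pvAInner (element : List Char) : List Char → Bool
  | [] => true
  | symbol :: rest =>
    if PySem.List.count element symbol ≠ 1 ∧ ¬ (symbol = ' ' ∨ symbol = '*') then false
    else pvAInner element rest

-- outer loop: 'for element in board: element = element[1:-1]; …'
def pvARows : List String → Bool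
  | [] => true
  | s :: rest =>
    let element := PySem.List.slice s.toList (some 1) (some (-1))
    if pvAInner element element then pvARows rest else false

def check_uniqueness_in_rows (board : List String) : Bool :=
  -- 'del board[0]; del board[-1]' : the rest of the function reads board.tail.dropLast
  pvARows board.tail.dropLast

-- ===== PORT B =====
-- 'for i in range(1, len(heights)): if heights[i-1] == heights[i]: return False' — adjacent scan
def pvNoAdjDup : List Char → Bool
  | [] => true
  | [_] => true
  | a :: b :: t => if a = b then false else pvNoAdjDup (b :: t)

def pvBRows : List String → Bool
  | [] => true
  | s :: rest =>
    let heights := PySem.List.sorted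
      ((PySem.List.slice s.toList (some 1) (some (-1))).filter
        (fun c => ¬ (c = ' ' ∨ c = '*'))) (fun c => c) false
    if pvNoAdjDup heights then pvBRows rest else false

def check_uniqueness_in_rows_alt (board : List String) : Bool :=
  pvBRows board.tail.dropLast

-- ===== PRECONDITION & SPEC =====
-- Pre_ excludes exactly the boards of length < 2, on which A raises IndexError
-- at 'del board[0]' or 'del board[-1]' (B raises identically there).
def Pre_check_uniqueness_in_rows (board : List String) : Prop := 2 ≤ board.length
instance (board : List String) : Decidable (Pre_check_uniqueness_in_rows board) := by
  unfold Pre_check_uniqueness_in_rows; infer_instance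

def pvWitness_check_uniqueness_in_rows : List String :=
  ["***21**", "412453*", "423145*", "*543215", "*35214*", "*41532*", "*2*1***"]

def Spec_check_uniqueness_in_rows (board : List String) (out : Bool) : Prop := out = check_uniqueness_in_rows_alt board
instance (board : List String) (out : Bool) : Decidable (Spec_check_uniqueness_in_rows board out) := by unfold Spec_check_uniqueness_in_rows; infer_instance

-- ===== CLAIM (what is proved, stated in full; the proofs are below) =====
def Claim_equal_check_uniqueness_in_rows : Prop := ∀ (board : List String), Dom_check_uniqueness_in_rows board → Pre_check_uniqueness_in_rows board → Spec_check_uniqueness_in_rows board (check_uniqueness_in_rows board)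

-- ===== LEMMAS AND PROOFS =====

-- A's inner loop succeeds iff every symbol has count 1 or is blank/star
theorem pvAInner_eq_true_iff (e : List Char) (l : List Char) :
    pvAInner e l = true ↔ ∀ c ∈ l, e.count c = 1 ∨ c = ' ' ∨ c = '*' := by
  induction l with
  | nil => simp [pvAInner]
  | cons a t ih =>
    simp only [pvAInner, PySem.List.count]
    split_ifs with h
    · simp only [false_iff]
      intro hall
      rcases hall a (by simp) with h1 | h2
      · exact h.1 h1
      · exact h.2 h2
    · push Not at h
      simp only [ih, List.mem_cons]
      constructor
      · intro hall c hc
        rcases hc with rfl | hc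
        · by_cases hcnt : e.count c = 1
          · exact Or.inl hcnt
          · exact Or.inr (h hcnt)
        · exact hall c hc
      · intro hall c hc
        exact hall c (Or.inr hc)

-- an adjacent-equality-free (≤)-sorted list is exactly a Nodup list
theorem pvNoAdjDup_iff_nodup (l : List Char) (hs : l.Pairwise (· ≤ ·)) :
    pvNoAdjDup l = true ↔ l.Nodup := by
  induction l with
  | nil => simp [pvNoAdjDup]
  | cons a t ih =>
    cases t with
    | nil => simp [pvNoAdjDup]
    | cons b t' =>
      rw [List.pairwise_cons] at hs
      obtain ⟨hab, hrest⟩ := hs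
      simp only [pvNoAdjDup]
      split_ifs with hEq
      · subst hEq
        simp only [false_iff, List.nodup_cons]
        intro h; exact h.1 (by simp)
      · rw [ih hrest]
        constructor
        · intro hnd
          refine List.nodup_cons.mpr ⟨?_, hnd⟩
          intro hmem
          rcases List.mem_cons.mp hmem with rfl | hmem'
          · exact hEq rfl
          · have h1 : a ≤ b := hab b (by simp)
            have h2 : b ≤ a := by
              rw [List.pairwise_cons] at hrest
              exact hrest.1 a hmem'
            exact hEq (le_antisymm h1 h2)
        · intro hnd
          exact (List.nodup_cons.mp hnd).2

-- per-row equivalence: A's count condition ↔ the filtered multiset is duplicate-free,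
-- detected by B on its sorted rearrangement
theorem pvRow_eq (e : List Char) :
    pvAInner e e =
      pvNoAdjDup (PySem.List.sorted (e.filter (fun c => ¬ (c = ' ' ∨ c = '*'))) (fun c => c) false) := by
  set f := e.filter (fun c => ¬ (c = ' ' ∨ c = '*')) with hf
  set s := PySem.List.sorted f (fun c => c) false with hsdef
  have hperm : s.Perm f := PySem.List.sorted_perm f _ _
  have hpw : s.Pairwise (fun a b => a ≤ b) := PySem.List.sorted_pairwise f (fun c => c) 
  have hiff : pvNoAdjDup s = true ↔ f.Nodup := by
    rw [pvNoAdjDup_iff_nodup s hpw]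
    exact hperm.nodup_iff
  have hnodup : f.Nodup ↔ ∀ c ∈ e, e.count c = 1 ∨ c = ' ' ∨ c = '*' := by
    rw [List.nodup_iff_count_le_one]
    constructor
    · intro h c hc
      by_cases hcs : c = ' ' ∨ c = '*'
      · exact Or.inr hcs
      · left
        have hcf : c ∈ f := by
          rw [hf, List.mem_filter]
          exact ⟨hc, by simpa using hcs⟩
        have h1 : 1 ≤ f.count c := List.one_le_count_iff.mpr hcf
        have h2 : f.count c ≤ 1 := h c
        have hfc : f.count c = e.count c := by
          rw [hf, List.count_filter]
          simp [hcs]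
        omega
    · intro h c
      by_cases hcf : c ∈ f
      · have hce : c ∈ e := by rw [hf, List.mem_filter] at hcf; exact hcf.1
        have hcs : ¬ (c = ' ' ∨ c = '*') := by
          rw [hf, List.mem_filter] at hcf; simpa using hcf.2
        rcases h c hce with h1 | h2
        · have : f.count c = e.count c := by
            rw [hf, List.count_filter]; simp [hcs]
          omega
        · exact absurd h2 hcs
      · simp [List.count_eq_zero_of_not_mem hcf]
  have h1 : pvAInner e e = true ↔ pvNoAdjDup s = true := by
    rw [pvAInner_eq_true_iff, hiff, hnodup]
  revert h1
  cases pvAInner e e <;> cases pvNoAdjDup s <;> simp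

theorem pvRows_eq (l : List String) : pvARows l = pvBRows l := by
  induction l with
  | nil => rfl
  | cons s rest ih =>
    simp only [pvARows, pvBRows]
    rw [pvRow_eq, ih]

-- ===== VERDICT (by name: the statement is the Claim_ definition above) =====
theorem check_uniqueness_in_rows_spec : Claim_equal_check_uniqueness_in_rows := by
  intro board _ _
  unfold Spec_check_uniqueness_in_rows check_uniqueness_in_rows check_uniqueness_in_rows_alt
  exact pvRows_eq _
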